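-- pv_equiv track=rewrite | github.com/NavDevs/Packet_Analyzer | python/server.py | sni_to_app
-- ===== SOURCE A (Python) =====
-- def sni_to_app(sni):
--     if not sni:
--         return 'Unknown'
--
--     lower = sni.lower()
--
--     if any(x in lower for x in ['youtube', 'ytimg', 'youtu.be']):
--         return 'YouTube'
--     if any(x in lower for x in ['google', 'gstatic', 'googleapis']):
--         return 'Google'
--     if any(x in lower for x in ['facebook', 'fbcdn', 'meta.com']):
--         return 'Facebook'
--     if any(x in lower for x in ['instagram', 'cdninstagram']):
--         return 'Instagram'
--     if any(x in lower for x in ['twitter', 'twimg', 'x.com']):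
--         return 'Twitter/X'
--     if any(x in lower for x in ['netflix', 'nflxvideo']):
--         return 'Netflix'
--     if any(x in lower for x in ['amazon', 'aws', 'cloudfront']):
--         return 'Amazon'
--     if any(x in lower for x in ['microsoft', 'office', 'azure', 'bing']):
--         return 'Microsoft'
--     if any(x in lower for x in ['apple', 'icloud', 'mzstatic']):
--         return 'Apple'
--     if any(x in lower for x in ['spotify', 'scdn.co']):
--         return 'Spotify'
--     if any(x in lower for x in ['discord', 'discordapp']):
--         return 'Discord'
--     if any(x in lower for x in ['tiktok', 'tiktokcdn']):
--         return 'TikTok'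
--     if any(x in lower for x in ['github', 'githubusercontent']):
--         return 'GitHub'
--
--     return 'HTTPS'
-- ===== SOURCE B (Python) =====
-- # B: instead of 13 ordered substring checks, enumerate the candidate substrings of the
-- # hostname once and look each up in a hash map pattern -> priority, keeping the minimum.
-- APPS = ['YouTube', 'Google', 'Facebook', 'Instagram', 'Twitter/X', 'Netflix',
--         'Amazon', 'Microsoft', 'Apple', 'Spotify', 'Discord', 'TikTok', 'GitHub']
--
-- PATTERN_RANK = {
--     'youtube': 0, 'ytimg': 0, 'youtu.be': 0,
--     'google': 1, 'gstatic': 1, 'googleapis': 1,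
--     'facebook': 2, 'fbcdn': 2, 'meta.com': 2,
--     'instagram': 3, 'cdninstagram': 3,
--     'twitter': 4, 'twimg': 4, 'x.com': 4,
--     'netflix': 5, 'nflxvideo': 5,
--     'amazon': 6, 'aws': 6, 'cloudfront': 6,
--     'microsoft': 7, 'office': 7, 'azure': 7, 'bing': 7,
--     'apple': 8, 'icloud': 8, 'mzstatic': 8,
--     'spotify': 9, 'scdn.co': 9,
--     'discord': 10, 'discordapp': 10,
--     'tiktok': 11, 'tiktokcdn': 11,
--     'github': 12, 'githubusercontent': 12,
-- }
--
-- LENS = sorted({len(p) for p in PATTERN_RANK})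
--
--
-- def _min_rank(lower):
--     best = len(APPS)
--     n = len(lower)
--     for i in range(n):
--         for L in LENS:
--             if i + L <= n:
--                 r = PATTERN_RANK.get(lower[i:i + L])
--                 if r is not None and r < best:
--                     best = r
--     return best
--
--
-- def sni_to_app(sni):
--     if not sni:
--         return 'Unknown'
--     best = _min_rank(sni.lower())
--     return APPS[best] if best < len(APPS) else 'HTTPS'
-- ===== Notes on version B (the rewrite author's own statement) =====
-- stated objective: alternative
-- what changed: Instead of thirteen ordered any-substring scans, B enumerates the hostname's candidate substrings once (per position, one slice per distinct pattern length) and looks each up in a hash map pattern->priority, returning the app of the minimum matched priority.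
import Mathlib
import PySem

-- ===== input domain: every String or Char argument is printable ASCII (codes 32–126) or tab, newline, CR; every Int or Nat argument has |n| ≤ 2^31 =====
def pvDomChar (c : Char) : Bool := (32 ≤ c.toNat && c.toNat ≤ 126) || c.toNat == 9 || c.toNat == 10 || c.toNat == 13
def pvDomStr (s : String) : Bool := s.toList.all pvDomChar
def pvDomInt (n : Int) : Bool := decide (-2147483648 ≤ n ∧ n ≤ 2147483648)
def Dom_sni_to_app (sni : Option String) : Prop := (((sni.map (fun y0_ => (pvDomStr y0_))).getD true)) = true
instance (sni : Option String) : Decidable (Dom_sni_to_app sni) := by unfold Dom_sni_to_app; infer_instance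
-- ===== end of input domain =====

set_option maxRecDepth 40000

-- ===== PORT A =====
def sni_to_app (sni : Option String) : String :=
  match sni with
  | none => "Unknown"
  | some s =>
    if s = "" then "Unknown"
    else
      let lower := PySem.Str.lower s
      if (["youtube", "ytimg", "youtu.be"].any (fun x => PySem.Str.isIn x lower)) then "YouTube"
      else if (["google", "gstatic", "googleapis"].any (fun x => PySem.Str.isIn x lower)) then "Google"
      else if (["facebook", "fbcdn", "meta.com"].any (fun x => PySem.Str.isIn x lower)) then "Facebook"
      else if (["instagram", "cdninstagram"].any (fun x => PySem.Str.isIn x lower)) then "Instagram"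
      else if (["twitter", "twimg", "x.com"].any (fun x => PySem.Str.isIn x lower)) then "Twitter/X"
      else if (["netflix", "nflxvideo"].any (fun x => PySem.Str.isIn x lower)) then "Netflix"
      else if (["amazon", "aws", "cloudfront"].any (fun x => PySem.Str.isIn x lower)) then "Amazon"
      else if (["microsoft", "office", "azure", "bing"].any (fun x => PySem.Str.isIn x lower)) then "Microsoft"
      else if (["apple", "icloud", "mzstatic"].any (fun x => PySem.Str.isIn x lower)) then "Apple"
      else if (["spotify", "scdn.co"].any (fun x => PySem.Str.isIn x lower)) then "Spotify"
      else if (["discord", "discordapp"].any (fun x => PySem.Str.isIn x lower)) then "Discord"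
      else if (["tiktok", "tiktokcdn"].any (fun x => PySem.Str.isIn x lower)) then "TikTok"
      else if (["github", "githubusercontent"].any (fun x => PySem.Str.isIn x lower)) then "GitHub"
      else "HTTPS"

-- ===== PORT B =====
-- B enumerates the hostname's candidate substrings once and looks each up in a
-- map pattern -> priority, returning the app of the minimum matched priority.
def pvApps : List String :=
  ["YouTube", "Google", "Facebook", "Instagram", "Twitter/X", "Netflix",
   "Amazon", "Microsoft", "Apple", "Spotify", "Discord", "TikTok", "GitHub"]

def pvPatRank : PySem.Dict String Int :=
  PySem.Dict.ofList
    [("youtube", 0), ("ytimg", 0), ("youtu.be", 0),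
     ("google", 1), ("gstatic", 1), ("googleapis", 1),
     ("facebook", 2), ("fbcdn", 2), ("meta.com", 2),
     ("instagram", 3), ("cdninstagram", 3),
     ("twitter", 4), ("twimg", 4), ("x.com", 4),
     ("netflix", 5), ("nflxvideo", 5),
     ("amazon", 6), ("aws", 6), ("cloudfront", 6),
     ("microsoft", 7), ("office", 7), ("azure", 7), ("bing", 7),
     ("apple", 8), ("icloud", 8), ("mzstatic", 8),
     ("spotify", 9), ("scdn.co", 9),
     ("discord", 10), ("discordapp", 10),
     ("tiktok", 11), ("tiktokcdn", 11),
     ("github", 12), ("githubusercontent", 12)]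

-- LENS = sorted({len(p) for p in PATTERN_RANK})
def pvLens : List Int :=
  PySem.List.sorted (PySem.Set.ofList (pvPatRank.keys.map (fun p => PySem.Str.len p))) id

-- _min_rank(lower)
def pvMinRank (lower : String) : Int :=
  let n : Int := PySem.Str.len lower
  (PySem.List.pyRange 0 n 1).foldl (fun best i =>
    pvLens.foldl (fun best L =>
      if i + L ≤ n then
        match pvPatRank.get? (PySem.Str.slice lower (some i) (some (i + L))) with
        | some r => if r < best then r else best
        | none => best
      else best) best) ((pvApps.length : Int))

def sni_to_app_alt (sni : Option String) : String :=
  match sni with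
  | none => "Unknown"
  | some s =>
    if s = "" then "Unknown"
    else
      let best := pvMinRank (PySem.Str.lower s)
      if best < (pvApps.length : Int) then (PySem.List.pyGet? pvApps best).getD "HTTPS"
      else "HTTPS"

-- ===== PRECONDITION & SPEC =====
def Spec_sni_to_app (sni : Option String) (out : String) : Prop := out = sni_to_app_alt sni
instance (sni : Option String) (out : String) : Decidable (Spec_sni_to_app sni out) := by unfold Spec_sni_to_app; infer_instance

-- ===== CLAIM (what is proved, stated in full; the proofs are below) =====
def Claim_equal_sni_to_app : Prop := ∀ (sni : Option String), Dom_sni_to_app sni → Spec_sni_to_app sni (sni_to_app sni)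

-- ===== LEMMAS AND PROOFS =====

-- the 13 pattern groups, in A's priority order
def pvGroups : List (List String) :=
  [["youtube", "ytimg", "youtu.be"],
   ["google", "gstatic", "googleapis"],
   ["facebook", "fbcdn", "meta.com"],
   ["instagram", "cdninstagram"],
   ["twitter", "twimg", "x.com"],
   ["netflix", "nflxvideo"],
   ["amazon", "aws", "cloudfront"],
   ["microsoft", "office", "azure", "bing"],
   ["apple", "icloud", "mzstatic"],
   ["spotify", "scdn.co"],
   ["discord", "discordapp"],
   ["tiktok", "tiktokcdn"],
   ["github", "githubusercontent"]]

-- 'group g matches w'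
def pvBG (g : Nat) (w : String) : Bool :=
  (pvGroups.getD g []).any (fun p => PySem.Str.isIn p w)

-- 'some pattern of rank r occurs in w'
def pvHit (w : String) (r : Int) : Prop :=
  ∃ p : String, pvPatRank.get? p = some r ∧ p.toList <:+: w.toList

-- generic: a fold that folds g over the hits of f equals folding g over filterMap f
theorem pv_foldl_filterMap {α : Type} (l : List α) (f : α → Option Int) (g : Int → Int → Int) (b : Int) :
    l.foldl (fun b x => match f x with | some r => g b r | none => b) b
      = (l.filterMap f).foldl g b := by
  induction l generalizing b with
  | nil => rfl
  | cons x xs ih =>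
    simp only [List.foldl_cons, List.filterMap_cons]
    cases f x <;> simp [ih]

def pvMinStep (b r : Int) : Int := if r < b then r else b

theorem pv_minfold_le_init (m : List Int) (b : Int) : m.foldl pvMinStep b ≤ b := by
  induction m generalizing b with
  | nil => simp
  | cons x xs ih =>
    simp only [List.foldl_cons]
    refine le_trans (ih _) ?_
    unfold pvMinStep; split <;> omega

theorem pv_minfold_le_mem (m : List Int) (b r : Int) (h : r ∈ m) : m.foldl pvMinStep b ≤ r := by
  induction m generalizing b with
  | nil => simp at h
  | cons x xs ih =>
    simp only [List.foldl_cons]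
    rcases List.mem_cons.mp h with rfl | h
    · refine le_trans (pv_minfold_le_init _ _) ?_
      unfold pvMinStep; split <;> omega
    · exact ih _ h

theorem pv_minfold_cases (m : List Int) (b : Int) :
    m.foldl pvMinStep b = b ∨ m.foldl pvMinStep b ∈ m := by
  induction m generalizing b with
  | nil => left; rfl
  | cons x xs ih =>
    simp only [List.foldl_cons]
    rcases ih (pvMinStep b x) with h | h
    · rw [h]; unfold pvMinStep; split
      · right; simp
      · left; rfl
    · right; simp [h]

-- per-position candidate: the rank of the substring of w at [i, i+L), if it is a pattern
def pvCand (w : String) (n i L : Int) : Option Int :=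
  if i + L ≤ n then pvPatRank.get? (PySem.Str.slice w (some i) (some (i + L))) else none

def pvAllCands (w : String) : List Int :=
  (PySem.List.pyRange 0 (PySem.Str.len w) 1).flatMap
    (fun i => pvLens.filterMap (pvCand w (PySem.Str.len w) i))

theorem pvMinRank_eq_minfold (w : String) :
    pvMinRank w = (pvAllCands w).foldl pvMinStep 13 := by
  have h13 : ((pvApps.length : Int)) = 13 := by norm_num [pvApps]
  have hstep : ∀ i : Int, (fun (b L : Int) => if i + L ≤ PySem.Str.len w then
        match pvPatRank.get? (PySem.Str.slice w (some i) (some (i + L))) with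
        | some r => if r < b then r else b
        | none => b
      else b) = (fun b L => match pvCand w (PySem.Str.len w) i L with
        | some r => pvMinStep b r | none => b) := by
    intro i; funext b L
    unfold pvCand pvMinStep
    split <;> rfl
  simp only [pvMinRank, pvAllCands]
  rw [List.foldl_flatMap, h13]
  congr 1
  funext b i
  rw [hstep i, pv_foldl_filterMap]

theorem pv_mem_allCands (w : String) (r : Int) :
    r ∈ pvAllCands w ↔ ∃ i L : Int, 0 ≤ i ∧ i < PySem.Str.len w ∧ L ∈ pvLens ∧
      pvCand w (PySem.Str.len w) i L = some r := by
  unfold pvAllCands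
  simp only [List.mem_flatMap, List.mem_filterMap, PySem.List.mem_pyRange_one]
  constructor
  · rintro ⟨i, ⟨h0, h1⟩, L, hL, hc⟩
    exact ⟨i, L, h0, h1, hL, hc⟩
  · rintro ⟨i, L, h0, h1, hL, hc⟩
    exact ⟨i, ⟨h0, h1⟩, L, hL, hc⟩

-- facts about the literal tables (kernel-checked)
theorem pv_key_facts : ∀ pr ∈ pvPatRank.items,
    pr.1.toList ≠ [] ∧ ((pr.1.toList.length : Int)) ∈ pvLens := by decide

theorem pv_items_lit : pvPatRank.items =
    [("youtube", 0), ("ytimg", 0), ("youtu.be", 0),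
     ("google", 1), ("gstatic", 1), ("googleapis", 1),
     ("facebook", 2), ("fbcdn", 2), ("meta.com", 2),
     ("instagram", 3), ("cdninstagram", 3),
     ("twitter", 4), ("twimg", 4), ("x.com", 4),
     ("netflix", 5), ("nflxvideo", 5),
     ("amazon", 6), ("aws", 6), ("cloudfront", 6),
     ("microsoft", 7), ("office", 7), ("azure", 7), ("bing", 7),
     ("apple", 8), ("icloud", 8), ("mzstatic", 8),
     ("spotify", 9), ("scdn.co", 9),
     ("discord", 10), ("discordapp", 10),
     ("tiktok", 11), ("tiktokcdn", 11),
     ("github", 12), ("githubusercontent", 12)] := by decide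

-- every pattern of group g has rank g in the dict
theorem pv_group_rank : ∀ g < 13, ∀ p ∈ pvGroups.getD g [], pvPatRank.get? p = some (g : Int) := by decide

theorem pv_nodup : pvPatRank.keys.Nodup := by decide

-- a dict hit means: rank in range and its pattern's group matches
set_option maxHeartbeats 2000000 in
theorem pv_hit_group (w : String) (r : Int) (h : pvHit w r) :
    0 ≤ r ∧ r < 13 ∧ pvBG r.toNat w = true := by
  obtain ⟨p, hget, hinf⟩ := h
  have hmem : (p, r) ∈ pvPatRank.items :=
    (PySem.Dict.get?_eq_some_iff_mem_items _ _ _ pv_nodup).mp hget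
  rw [pv_items_lit] at hmem
  have hIn : PySem.Str.isIn p w = true := (PySem.Str.isIn_iff_infix p w).mpr hinf
  fin_cases hmem <;> exact ⟨by norm_num, by norm_num, by simp [pvBG, pvGroups]; simp at hIn; tauto⟩

-- if group g matches then pvMinRank w ≤ g
theorem pvMinRank_le (w : String) (r : Int) (h : pvHit w r) : pvMinRank w ≤ r := by
  obtain ⟨p, hget, hinf⟩ := h
  have hkey := pv_key_facts (p, r) ((PySem.Dict.get?_eq_some_iff_mem_items _ _ _ pv_nodup).mp hget)
  obtain ⟨hne, hlen⟩ := hkey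
  -- get a position j with p.toList a prefix of w.toList.drop j
  have hIn : PySem.Chars.isIn p.toList w.toList = true :=
    (PySem.Chars.isIn_iff_infix _ _).mpr hinf
  obtain ⟨j, hpre⟩ := (PySem.Chars.exists_prefix_drop_iff_isIn p.toList w.toList).mpr hIn
  have hlenle : p.toList.length ≤ w.toList.length - j := by
    have := hpre.length_le
    simpa [List.length_drop] using this
  have hjlt : j < w.toList.length := by
    by_contra hj
    rw [not_lt] at hj
    rw [List.drop_eq_nil_of_le hj] at hpre
    exact hne (List.prefix_nil.mp hpre)
  -- the slice at (j, j + |p|) is exactly p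
  have hslice : PySem.Str.slice w (some (j : Int)) (some ((j : Int) + (p.toList.length : Int))) = p := by
    apply String.toList_inj.mp
    rw [PySem.Str.toList_slice]
    rw [PySem.Chars.slice_eq_listSlice]
    rw [PySem.List.slice_natCast_add]
    exact (List.prefix_iff_eq_take.mp hpre).symm
  have hcand : pvCand w (PySem.Str.len w) (j : Int) (p.toList.length : Int) = some r := by
    unfold pvCand
    rw [if_pos]
    · rw [hslice]; exact hget
    · have : PySem.Str.len w = (w.toList.length : Int) := by simp [PySem.Str.len]
      rw [this]; omega
  have hmem : r ∈ pvAllCands w := by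
    rw [pv_mem_allCands]
    refine ⟨(j : Int), (p.toList.length : Int), by positivity, ?_, hlen, hcand⟩
    have : PySem.Str.len w = (w.toList.length : Int) := by simp [PySem.Str.len]
    rw [this]; exact_mod_cast hjlt
  rw [pvMinRank_eq_minfold]
  exact pv_minfold_le_mem _ _ _ hmem

-- pvMinRank is either the sentinel 13 or an actual hit
theorem pvMinRank_cases (w : String) : pvMinRank w = 13 ∨ pvHit w (pvMinRank w) := by
  rw [pvMinRank_eq_minfold]
  rcases pv_minfold_cases (pvAllCands w) 13 with h | h
  · left; exact h
  · right
    rw [pv_mem_allCands] at h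
    obtain ⟨i, L, h0, h1, hL, hc⟩ := h
    unfold pvCand at hc
    by_cases hg : i + L ≤ PySem.Str.len w
    · rw [if_pos hg] at hc
      refine ⟨PySem.Str.slice w (some i) (some (i + L)), hc, ?_⟩
      -- the slice is an infix of w
      have hLpos : 0 ≤ L := by
        have : ∀ L' ∈ pvLens, 0 ≤ L' := by decide
        exact this L hL
      obtain ⟨j, rfl⟩ : ∃ j : ℕ, i = (j : Int) := ⟨i.toNat, by omega⟩
      obtain ⟨M, rfl⟩ : ∃ M : ℕ, L = (M : Int) := ⟨L.toNat, by omega⟩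
      rw [PySem.Str.toList_slice, PySem.Chars.slice_eq_listSlice, PySem.List.slice_natCast_add]
      exact ((List.take_prefix _ _).isInfix).trans ((List.drop_suffix _ _).isInfix)
    rw [if_neg hg] at hc; exact absurd hc (by simp)

-- branch lemmas
theorem pvMinRank_eq_of_first (w : String) (g : Nat) (hg : g < 13)
    (hfalse : ∀ g' < g, pvBG g' w = false) (htrue : pvBG g w = true) :
    pvMinRank w = (g : Int) := by
  have hle : pvMinRank w ≤ (g : Int) := by
    unfold pvBG at htrue
    rw [List.any_eq_true] at htrue
    obtain ⟨p, hp, hIn⟩ := htrue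
    refine pvMinRank_le w (g : Int) ⟨p, pv_group_rank g hg p hp, ?_⟩
    exact (PySem.Str.isIn_iff_infix p w).mp hIn
  rcases pvMinRank_cases w with h | h
  · omega
  · obtain ⟨h0, h1, hbg⟩ := pv_hit_group w _ h
    by_contra hne
    have hlt : pvMinRank w < (g : Int) := lt_of_le_of_ne hle hne
    have : (pvMinRank w).toNat < g := by omega
    have := hfalse _ this
    rw [this] at hbg
    exact Bool.false_ne_true hbg

theorem pvMinRank_eq_13 (w : String) (hfalse : ∀ g' < 13, pvBG g' w = false) :
    pvMinRank w = 13 := by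
  rcases pvMinRank_cases w with h | h
  · exact h
  · obtain ⟨h0, h1, hbg⟩ := pv_hit_group w _ h
    have : (pvMinRank w).toNat < 13 := by omega
    have := hfalse _ this
    rw [this] at hbg
    exact absurd hbg Bool.false_ne_true

-- ===== VERDICT (by name: the statement is the Claim_ definition above) =====
set_option maxHeartbeats 4000000 in
theorem sni_to_app_spec : Claim_equal_sni_to_app := by
  intro sni _
  unfold Spec_sni_to_app
  cases sni with
  | none => rfl
  | some s =>
    by_cases hs : s = ""
    · simp [sni_to_app, sni_to_app_alt, hs]
    · simp only [sni_to_app, sni_to_app_alt, if_neg hs]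
      generalize PySem.Str.lower s = w
      rw [show (["youtube", "ytimg", "youtu.be"].any (fun x => PySem.Str.isIn x w)) = pvBG 0 w from rfl, show (["google", "gstatic", "googleapis"].any (fun x => PySem.Str.isIn x w)) = pvBG 1 w from rfl, show (["facebook", "fbcdn", "meta.com"].any (fun x => PySem.Str.isIn x w)) = pvBG 2 w from rfl, show (["instagram", "cdninstagram"].any (fun x => PySem.Str.isIn x w)) = pvBG 3 w from rfl, show (["twitter", "twimg", "x.com"].any (fun x => PySem.Str.isIn x w)) = pvBG 4 w from rfl, show (["netflix", "nflxvideo"].any (fun x => PySem.Str.isIn x w)) = pvBG 5 w from rfl, show (["amazon", "aws", "cloudfront"].any (fun x => PySem.Str.isIn x w)) = pvBG 6 w from rfl, show (["microsoft", "office", "azure", "bing"].any (fun x => PySem.Str.isIn x w)) = pvBG 7 w from rfl, show (["apple", "icloud", "mzstatic"].any (fun x => PySem.Str.isIn x w)) = pvBG 8 w from rfl, show (["spotify", "scdn.co"].any (fun x => PySem.Str.isIn x w)) = pvBG 9 w from rfl, show (["discord", "discordapp"].any (fun x => PySem.Str.isIn x w)) = pvBG 10 w from rfl, show (["tiktok",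 "tiktokcdn"].any (fun x => PySem.Str.isIn x w)) = pvBG 11 w from rfl, show (["github", "githubusercontent"].any (fun x => PySem.Str.isIn x w)) = pvBG 12 w from rfl]
      by_cases h0 : pvBG 0 w = true
      · have hm : pvMinRank w = ((0 : Nat) : Int) := pvMinRank_eq_of_first w 0 (by norm_num) (fun g' hg' => absurd hg' (Nat.not_lt_zero g')) h0
        rw [hm, if_pos h0]
        decide
      rw [if_neg h0]
      rw [Bool.not_eq_true] at h0
      by_cases h1 : pvBG 1 w = true
      · have hm : pvMinRank w = ((1 : Nat) : Int) := pvMinRank_eq_of_first w 1 (by norm_num) (fun g' hg' => match g', hg' with | 0, _ => h0 | n+1, hh => absurd hh (by omega)) h1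
        rw [hm, if_pos h1]
        decide
      rw [if_neg h1]
      rw [Bool.not_eq_true] at h1
      by_cases h2 : pvBG 2 w = true
      · have hm : pvMinRank w = ((2 : Nat) : Int) := pvMinRank_eq_of_first w 2 (by norm_num) (fun g' hg' => match g', hg' with | 0, _ => h0 | 1, _ => h1 | n+2, hh => absurd hh (by omega)) h2
        rw [hm, if_pos h2]
        decide
      rw [if_neg h2]
      rw [Bool.not_eq_true] at h2
      by_cases h3 : pvBG 3 w = true
      · have hm : pvMinRank w = ((3 : Nat) : Int) := pvMinRank_eq_of_first w 3 (by norm_num) (fun g' hg' => match g', hg' with | 0, _ => h0 | 1, _ => h1 | 2, _ => h2 | n+3, hh => absurd hh (by omega)) h3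
        rw [hm, if_pos h3]
        decide
      rw [if_neg h3]
      rw [Bool.not_eq_true] at h3
      by_cases h4 : pvBG 4 w = true
      · have hm : pvMinRank w = ((4 : Nat) : Int) := pvMinRank_eq_of_first w 4 (by norm_num) (fun g' hg' => match g', hg' with | 0, _ => h0 | 1, _ => h1 | 2, _ => h2 | 3, _ => h3 | n+4, hh => absurd hh (by omega)) h4
        rw [hm, if_pos h4]
        decide
      rw [if_neg h4]
      rw [Bool.not_eq_true] at h4
      by_cases h5 : pvBG 5 w = true
      · have hm : pvMinRank w = ((5 : Nat) : Int) := pvMinRank_eq_of_first w 5 (by norm_num) (fun g' hg' => match g', hg' with | 0, _ => h0 | 1, _ => h1 | 2, _ => h2 | 3, _ => h3 | 4, _ => h4 | n+5, hh => absurd hh (by omega)) h5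
        rw [hm, if_pos h5]
        decide
      rw [if_neg h5]
      rw [Bool.not_eq_true] at h5
      by_cases h6 : pvBG 6 w = true
      · have hm : pvMinRank w = ((6 : Nat) : Int) := pvMinRank_eq_of_first w 6 (by norm_num) (fun g' hg' => match g', hg' with | 0, _ => h0 | 1, _ => h1 | 2, _ => h2 | 3, _ => h3 | 4, _ => h4 | 5, _ => h5 | n+6, hh => absurd hh (by omega)) h6
        rw [hm, if_pos h6]
        decide
      rw [if_neg h6]
      rw [Bool.not_eq_true] at h6
      by_cases h7 : pvBG 7 w = true
      · have hm : pvMinRank w = ((7 : Nat) : Int) := pvMinRank_eq_of_first w 7 (by norm_num) (fun g' hg' => match g', hg' with | 0, _ => h0 | 1, _ => h1 | 2, _ => h2 | 3, _ => h3 | 4, _ => h4 | 5, _ => h5 | 6, _ => h6 | n+7, hh => absurd hh (by omega)) h7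
        rw [hm, if_pos h7]
        decide
      rw [if_neg h7]
      rw [Bool.not_eq_true] at h7
      by_cases h8 : pvBG 8 w = true
      · have hm : pvMinRank w = ((8 : Nat) : Int) := pvMinRank_eq_of_first w 8 (by norm_num) (fun g' hg' => match g', hg' with | 0, _ => h0 | 1, _ => h1 | 2, _ => h2 | 3, _ => h3 | 4, _ => h4 | 5, _ => h5 | 6, _ => h6 | 7, _ => h7 | n+8, hh => absurd hh (by omega)) h8
        rw [hm, if_pos h8]
        decide
      rw [if_neg h8]
      rw [Bool.not_eq_true] at h8
      by_cases h9 : pvBG 9 w = true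
      · have hm : pvMinRank w = ((9 : Nat) : Int) := pvMinRank_eq_of_first w 9 (by norm_num) (fun g' hg' => match g', hg' with | 0, _ => h0 | 1, _ => h1 | 2, _ => h2 | 3, _ => h3 | 4, _ => h4 | 5, _ => h5 | 6, _ => h6 | 7, _ => h7 | 8, _ => h8 | n+9, hh => absurd hh (by omega)) h9
        rw [hm, if_pos h9]
        decide
      rw [if_neg h9]
      rw [Bool.not_eq_true] at h9
      by_cases h10 : pvBG 10 w = true
      · have hm : pvMinRank w = ((10 : Nat) : Int) := pvMinRank_eq_of_first w 10 (by norm_num) (fun g' hg' => match g', hg' with | 0, _ => h0 | 1, _ => h1 | 2, _ => h2 | 3, _ => h3 | 4, _ => h4 | 5, _ => h5 | 6, _ => h6 | 7, _ => h7 | 8, _ => h8 | 9, _ => h9 | n+10, hh => absurd hh (by omega)) h10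
        rw [hm, if_pos h10]
        decide
      rw [if_neg h10]
      rw [Bool.not_eq_true] at h10
      by_cases h11 : pvBG 11 w = true
      · have hm : pvMinRank w = ((11 : Nat) : Int) := pvMinRank_eq_of_first w 11 (by norm_num) (fun g' hg' => match g', hg' with | 0, _ => h0 | 1, _ => h1 | 2, _ => h2 | 3, _ => h3 | 4, _ => h4 | 5, _ => h5 | 6, _ => h6 | 7, _ => h7 | 8, _ => h8 | 9, _ => h9 | 10, _ => h10 | n+11, hh => absurd hh (by omega)) h11
        rw [hm, if_pos h11]
        decide
      rw [if_neg h11]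
      rw [Bool.not_eq_true] at h11
      by_cases h12 : pvBG 12 w = true
      · have hm : pvMinRank w = ((12 : Nat) : Int) := pvMinRank_eq_of_first w 12 (by norm_num) (fun g' hg' => match g', hg' with | 0, _ => h0 | 1, _ => h1 | 2, _ => h2 | 3, _ => h3 | 4, _ => h4 | 5, _ => h5 | 6, _ => h6 | 7, _ => h7 | 8, _ => h8 | 9, _ => h9 | 10, _ => h10 | 11, _ => h11 | n+12, hh => absurd hh (by omega)) h12
        rw [hm, if_pos h12]
        decide
      rw [if_neg h12]
      rw [Bool.not_eq_true] at h12
      have hm : pvMinRank w = 13 := pvMinRank_eq_13 w (fun g' hg' => match g', hg' with | 0, _ => h0 | 1, _ => h1 | 2, _ => h2 | 3, _ => h3 | 4, _ => h4 | 5, _ => h5 | 6, _ => h6 | 7, _ => h7 | 8, _ => h8 | 9, _ => h9 | 10, _ => h10 | 11, _ => h11 | 12, _ => h12 | n+13, hh => absurd hh (by omega))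
      rw [hm]
      decide
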